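-- pv_equiv track=rewrite | github.com/XaviCode1000/universal-ingestion-framework | uif_scraper/navigation.py | is_asset
-- ===== SOURCE A (Python) =====
-- def is_asset(url: str) -> bool:
--     asset_extensions = [
--         ".pdf",
--         ".jpg",
--         ".png",
--         ".jpeg",
--         ".gif",
--         ".svg",
--         ".webp",
--         ".md",  # Markdown files are assets, not webpages
--         ".txt",  # Text files
--         ".csv",  # Data files
--     ]
--     return any(url.lower().endswith(ext) for ext in asset_extensions)
-- ===== SOURCE B (Python) =====
-- ASSET_EXTENSIONS = {"pdf", "jpg", "png", "jpeg", "gif", "svg", "webp", "md", "txt", "csv"}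
--
--
-- def is_asset(url: str) -> bool:
--     low = url.lower()
--     if "." not in low:
--         return False
--     return low.rsplit(".", 1)[-1] in ASSET_EXTENSIONS
-- ===== Notes on version B (the rewrite author's own statement) =====
-- stated objective: simpler
-- what changed: Replaces the loop of 10 endswith checks with one extraction of the substring after the last dot plus a single set membership test.
import Mathlib
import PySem

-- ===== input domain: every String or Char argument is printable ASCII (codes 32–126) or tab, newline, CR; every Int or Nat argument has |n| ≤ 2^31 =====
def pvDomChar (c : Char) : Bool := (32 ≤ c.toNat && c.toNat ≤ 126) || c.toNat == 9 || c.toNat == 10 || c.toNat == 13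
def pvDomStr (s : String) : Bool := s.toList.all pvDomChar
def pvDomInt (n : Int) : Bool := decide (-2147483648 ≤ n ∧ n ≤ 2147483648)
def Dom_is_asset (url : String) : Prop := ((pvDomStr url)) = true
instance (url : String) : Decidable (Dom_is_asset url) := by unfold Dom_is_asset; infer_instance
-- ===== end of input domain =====

-- B replaces A's loop of endswith checks with one "segment after the last dot" extraction
-- plus a single set membership test; objective: simpler.

-- ===== PORT A =====
def is_asset (url : String) : Bool :=
  let asset_extensions : List String :=
    [".pdf", ".jpg", ".png", ".jpeg", ".gif", ".svg", ".webp", ".md", ".txt", ".csv"]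
  asset_extensions.any (fun ext => PySem.Str.endswith (PySem.Str.lower url) ext)

-- ===== PORT B =====
-- the set of bare extension names (Source B's ASSET_EXTENSIONS)
def assetExts : List (List Char) :=
  ["pdf".toList, "jpg".toList, "png".toList, "jpeg".toList, "gif".toList,
   "svg".toList, "webp".toList, "md".toList, "txt".toList, "csv".toList]

-- hand port of «low.rsplit(".", 1)[-1] if "." in low else no value»:
-- the segment after the LAST dot, none when there is no dot (exact on all lists)
def lastExt : List Char → Option (List Char)
  | [] => none
  | c :: rest =>
    match lastExt rest with
    | some e => some e
    | none => if c = '.' then some rest else none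

def is_asset_alt (url : String) : Bool :=
  match lastExt (PySem.Str.lower url).toList with
  | some e => assetExts.contains e
  | none => false

-- ===== PRECONDITION & SPEC =====
def Spec_is_asset (url : String) (out : Bool) : Prop := out = is_asset_alt url
instance (url : String) (out : Bool) : Decidable (Spec_is_asset url out) := by unfold Spec_is_asset; infer_instance

-- ===== CLAIM (what is proved, stated in full; the proofs are below) =====
def Claim_equal_is_asset : Prop := ∀ (url : String), Dom_is_asset url → Spec_is_asset url (is_asset url)

-- ===== LEMMAS AND PROOFS =====

lemma lastExt_of_noDot (cs : List Char) (h : '.' ∉ cs) : lastExt cs = none := by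
  induction cs with
  | nil => rfl
  | cons c rest ih =>
    have hc : c ≠ '.' := fun hc => h (by simp [hc])
    have hr : '.' ∉ rest := fun hr => h (by simp [hr])
    simp [lastExt, ih hr, hc]

lemma lastExt_append (p e : List Char) (h : '.' ∉ e) : lastExt (p ++ '.' :: e) = some e := by
  induction p with
  | nil => simp [lastExt, lastExt_of_noDot e h]
  | cons c rest ih => simp [lastExt, ih]

lemma noDot_of_lastExt_none (cs : List Char) (h : lastExt cs = none) : '.' ∉ cs := by
  induction cs with
  | nil => simp
  | cons c rest ih =>
    simp only [lastExt] at h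
    cases h0 : lastExt rest with
    | some e' => rw [h0] at h; exact absurd h (by simp)
    | none =>
      rw [h0] at h
      by_cases hc : c = '.'
      · simp [hc] at h
      · simp only [List.mem_cons, not_or]
        exact ⟨fun hdc => hc hdc.symm, ih h0⟩

lemma lastExt_some (cs e : List Char) (h : lastExt cs = some e) :
    '.' ∉ e ∧ ('.' :: e) <:+ cs := by
  induction cs generalizing e with
  | nil => simp [lastExt] at h
  | cons c rest ih =>
    cases h0 : lastExt rest with
    | some e' =>
      obtain ⟨hnd, t, ht⟩ := ih e' h0
      have h' : e' = e := by simp [lastExt, h0] at h; exact h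
      subst h'
      exact ⟨hnd, c :: t, by simp [ht]⟩
    | none =>
      by_cases hc : c = '.'
      · have h' : rest = e := by simp [lastExt, h0, hc] at h; exact h
        subst h'
        exact ⟨noDot_of_lastExt_none rest h0, [], by simp [hc]⟩
      · exfalso; simp [lastExt, h0, hc] at h

lemma endswith_dot (cs e : List Char) (h : '.' ∉ e) :
    PySem.Chars.endswith cs ('.' :: e)
      = (match lastExt cs with | some e0 => e0 == e | none => false) := by
  cases h0 : lastExt cs with
  | none =>
    cases hE : PySem.Chars.endswith cs ('.' :: e) with
    | false => rfl
    | true =>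
      exfalso
      obtain ⟨t, ht⟩ := (PySem.Chars.endswith_iff cs ('.' :: e)).1 hE
      rw [← ht, lastExt_append t e h] at h0
      simp at h0
  | some e0 =>
    show PySem.Chars.endswith cs ('.' :: e) = (e0 == e)
    cases heq : (e0 == e) with
    | true =>
      obtain rfl : e0 = e := by simpa using heq
      obtain ⟨_, t, ht⟩ := lastExt_some cs e0 h0
      exact (PySem.Chars.endswith_iff cs ('.' :: e0)).2 ⟨t, ht⟩
    | false =>
      cases hE : PySem.Chars.endswith cs ('.' :: e) with
      | false => rfl
      | true =>
        exfalso
        obtain ⟨t, ht⟩ := (PySem.Chars.endswith_iff cs ('.' :: e)).1 hE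
        rw [← ht, lastExt_append t e h] at h0
        obtain rfl : e0 = e := by simpa using h0.symm
        simp at heq

lemma any_endswith_eq (exts : List (List Char)) (h : ∀ e ∈ exts, '.' ∉ e) (cs : List Char) :
    (exts.map (fun e => '.' :: e)).any (fun d => PySem.Chars.endswith cs d)
      = (match lastExt cs with | some e0 => exts.contains e0 | none => false) := by
  induction exts with
  | nil => cases h0 : lastExt cs <;> simp
  | cons e rest ih =>
    simp only [List.map_cons, List.any_cons]
    rw [endswith_dot cs e (h e (by simp)), ih (fun x hx => h x (by simp [hx]))]
    cases h0 : lastExt cs <;> simp [beq_eq_decide]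

-- ===== VERDICT (by name: the statement is the Claim_ definition above) =====
theorem is_asset_spec : Claim_equal_is_asset := by
  intro url _
  show is_asset url = is_asset_alt url
  have key := any_endswith_eq assetExts (by decide) (PySem.Str.lower url).toList
  have hlist :
      ([".pdf", ".jpg", ".png", ".jpeg", ".gif", ".svg", ".webp", ".md", ".txt", ".csv"] :
          List String).any (fun ext => PySem.Str.endswith (PySem.Str.lower url) ext)
        = (assetExts.map (fun e => '.' :: e)).any
            (fun d => PySem.Chars.endswith (PySem.Str.lower url).toList d) := by
    simp [assetExts, PySem.Str.endswith]
  unfold is_asset is_asset_alt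
  rw [hlist, key]
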